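-- pv_equiv track=rewrite | github.com/denimani/Test_4_tasks | task_1/task_1.py | find_path
-- ===== SOURCE A (Python) =====
-- def find_path(n, m):
--     # создаем исходный список, где числа от 1 до n повторяются m раз
--     list_1 = m * [int(i) for i in range(1, n + 1)]
--     list_2 = [' ']  # временный список для хранения текущей последовательности
--     list_3 = []  # итоговый список для хранения всех последовательностей
--     count = 0  # счетчик для управления смещением
--
--     # выполняем цикл, пока последний элемент временного списка не станет равным 1
--     while list_2[-1] != 1:
--         list_2.clear()
--
--         for j in range(count, m + count):
--             list_2.append(list_1[j])
--             count += 1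
--
--         list_2_copy = list_2.copy()
--         list_3.append(list_2_copy)
--         count -= 1
--
--     return list_3
-- ===== SOURCE B (Python) =====
-- def find_path(n, m):
--     # The number of windows is known in advance by number theory: the walk
--     # closes when the window's last index (k+1)*(m-1) first becomes a multiple
--     # of n, i.e. after n // gcd(m-1, n) windows.  Each window is then produced
--     # by chaining the cyclic successor from where the previous window ended,
--     # with no tiled list and no modular index arithmetic.
--     a, b = m - 1, n
--     while b:
--         a, b = b, a % b
--     k = n // a
--     res = []
--     start = 1
--     for _ in range(k):
--         w = [start]
--         for _ in range(m - 1):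
--             w.append(1 if w[-1] == n else w[-1] + 1)
--         res.append(w)
--         start = w[-1]
--     return res
-- ===== Notes on version B (the rewrite author's own statement) =====
-- stated objective: alternative
-- what changed: B computes the number of windows in closed form as n // gcd(m-1, n) (Euclid) and then generates exactly that many windows by chaining the cyclic successor from the previous window's last value, instead of materializing the n*m tiled list and testing each window's last element for 1.
import Mathlib
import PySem

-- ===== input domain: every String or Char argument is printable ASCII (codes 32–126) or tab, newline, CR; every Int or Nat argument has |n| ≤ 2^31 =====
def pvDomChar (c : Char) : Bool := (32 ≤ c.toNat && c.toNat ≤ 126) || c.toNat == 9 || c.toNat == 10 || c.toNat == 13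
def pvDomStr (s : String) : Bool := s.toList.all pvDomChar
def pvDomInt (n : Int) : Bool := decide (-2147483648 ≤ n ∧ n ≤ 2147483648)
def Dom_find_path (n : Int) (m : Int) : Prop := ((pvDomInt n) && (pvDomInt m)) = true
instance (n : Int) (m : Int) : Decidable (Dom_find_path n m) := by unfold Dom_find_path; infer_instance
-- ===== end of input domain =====

-- B replaces A's tiled list and last==1 scan by a closed-form window count n // gcd(m-1, n)
-- plus cyclic-successor chaining (objective: alternative).


-- ===== PORT A =====
-- list_1 = m * [int(i) for i in range(1, n + 1)]
def fpA_list1 (n : Int) (m : Int) : List Int :=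
  (List.replicate m.toNat (PySem.List.pyRange 1 (n + 1) 1)).flatten

-- the for-loop body: list_2 rebuilt from scratch, count incremented per append
-- (pyGetD default 0 stands for the IndexError branch; Pre_ keeps every access in range)
def fpA_inner (list_1 : List Int) (m : Int) (count : Int) : List Int × Int :=
  (PySem.List.pyRange count (m + count) 1).foldl
    (fun (st : List Int × Int) j => (st.1 ++ [PySem.List.pyGetD list_1 j 0], st.2 + 1))
    ([], count)

-- the while-loop; initial list_2 = [' '] makes the first test always true, so the
-- transcription runs the body first and tests after.  The fuel only makes the
-- recursion total; under Pre_ the loop always ends before it runs out (proved below).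
def fpA_loop (list_1 : List Int) (m : Int) : Nat → Int → List (List Int) → List (List Int)
  | 0, _, list_3 => list_3
  | fuel + 1, count, list_3 =>
      let st := fpA_inner list_1 m count
      let list_2 := st.1
      let list_3' := list_3 ++ [list_2]
      let count' := st.2 - 1
      if PySem.List.pyGetD list_2 (-1) 0 ≠ 1 then fpA_loop list_1 m fuel count' list_3'
      else list_3'

def find_path (n : Int) (m : Int) : List (List Int) :=
  fpA_loop (fpA_list1 n m) m (n.toNat + 1) 0 []

-- ===== PORT B =====
-- while b: a, b = b, a % b   (fuel only for totality; Euclid ends long before n.natAbs+1 steps)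
def fpB_gcd : Nat → Int → Int → Int
  | 0, a, _ => a
  | fuel + 1, a, b => if b ≠ 0 then fpB_gcd fuel b (PySem.Int.mod a b) else a

-- w = [start]; for _ in range(m-1): w.append(1 if w[-1] == n else w[-1] + 1)
def fpB_window (n : Int) (m : Int) (start : Int) : List Int :=
  (PySem.List.pyRange 0 (m - 1) 1).foldl
    (fun (w : List Int) _ =>
      let last := PySem.List.pyGetD w (-1) 0
      w ++ [if last = n then 1 else last + 1])
    [start]

def find_path_alt (n : Int) (m : Int) : List (List Int) :=
  let a := fpB_gcd (n.natAbs + 1) (m - 1) n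
  let k := PySem.Int.floordiv n a
  let st := (PySem.List.pyRange 0 k 1).foldl
      (fun (st : List (List Int) × Int) _ =>
        let w := fpB_window n m st.2
        (st.1 ++ [w], PySem.List.pyGetD w (-1) 0))
      ([], 1)
  st.1

-- ===== PRECONDITION & SPEC =====
-- Pre_ excludes exactly the inputs where A raises: for n ≤ 0 or m ≤ 0 the Python A
-- hits an IndexError (on list_1[j] or on list_2[-1] of an empty window).
def Pre_find_path (n : Int) (m : Int) : Prop := 1 ≤ n ∧ 1 ≤ m
instance (n : Int) (m : Int) : Decidable (Pre_find_path n m) := by unfold Pre_find_path; infer_instance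
def pvWitness_find_path : Int × Int := (5, 3)

def Spec_find_path (n : Int) (m : Int) (out : List (List Int)) : Prop := out = find_path_alt n m
instance (n : Int) (m : Int) (out : List (List Int)) : Decidable (Spec_find_path n m out) := by unfold Spec_find_path; infer_instance

-- ===== CLAIM (what is proved, stated in full; the proofs are below) =====
def Claim_equal_find_path : Prop := ∀ (n : Int) (m : Int), Dom_find_path n m → Pre_find_path n m → Spec_find_path n m (find_path n m)

-- ===== LEMMAS AND PROOFS =====

-- the common reference value: window k of the walk is [ (k*(m-1)+t) % n + 1 | t < m ]
def fpW (n m : Int) (k : Nat) : List Int :=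
  (List.range m.toNat).map (fun (t : Nat) => ((k : Int) * (m - 1) + t) % n + 1)


theorem succ_mod (n x : Int) (hn : 1 ≤ n) :
    (if x % n + 1 = n then (1:Int) else x % n + 1 + 1) = (x + 1) % n + 1 := by
  have h0 : 0 ≤ x % n := Int.emod_nonneg x (by omega)
  have h1 : x % n < n := Int.emod_lt_of_pos x (by omega)
  have hx : (x + 1) % n = (x % n + 1) % n := by
    have h := Int.add_mul_emod_self_left (a := x % n + 1) (b := n) (c := x / n)
    have h2 := Int.emod_add_mul_ediv x n
    rw [show x % n + 1 + n * (x / n) = x + 1 by linarith] at h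
    omega
  by_cases hc : x % n + 1 = n
  · rw [if_pos hc, hx, hc, Int.emod_self]; norm_num
  · rw [if_neg hc, hx, Int.emod_eq_of_lt (a := x % n + 1) (by omega) (by omega)]

theorem flatten_rep_get (n : Int) (M t : Nat) (ht : t < n.toNat * M) :
    ((List.replicate M ((List.range n.toNat).map (fun (k : Nat) => (1 : Int) + k))).flatten)[t]?
      = some (((t % n.toNat : Nat) : Int) + 1) := by
  induction M generalizing t with
  | zero => omega
  | succ M ih =>
    rw [List.replicate_succ, List.flatten_cons]
    by_cases hc : t < n.toNat
    · rw [List.getElem?_append_left (by simpa using hc)]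
      rw [List.getElem?_map, List.getElem?_range hc, Nat.mod_eq_of_lt hc]
      simp only [Option.map_some, Option.some.injEq]
      omega
    · rw [Nat.not_lt] at hc
      rw [List.getElem?_append_right (by simpa using hc)]
      have hmul : n.toNat * (M+1) = n.toNat * M + n.toNat := by ring
      have := ih (t - n.toNat) (by omega)
      simp only [List.length_map, List.length_range] at *
      rw [this, Nat.mod_eq_sub_mod hc]

theorem list1_get (n m : Int) (hn : 1 ≤ n) (j : Int) (h0 : 0 ≤ j) (h1 : j < n * m) :
    PySem.List.pyGetD (fpA_list1 n m) j 0 = j % n + 1 := by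
  have hm : 0 ≤ m := by nlinarith
  have hcast : ((n.toNat : Int)) * ((m.toNat : Int)) = n * m := by
    rw [Int.toNat_of_nonneg (by omega), Int.toNat_of_nonneg hm]
  have hlt : j.toNat < n.toNat * m.toNat := by
    have : ((n.toNat * m.toNat : Nat) : Int) = n * m := by push_cast; exact hcast
    omega
  have hget := flatten_rep_get n m.toNat j.toNat hlt
  rw [show j = ((j.toNat : Nat) : Int) by omega, PySem.List.pyGetD_natCast]
  unfold fpA_list1
  rw [PySem.List.pyRange_one, show (n + 1 - 1).toNat = n.toNat by omega] at *
  rw [List.getD, hget]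
  simp only [Option.getD_some]
  push_cast
  rw [Int.toNat_of_nonneg (show (0:Int) ≤ n by omega), Int.toNat_of_nonneg h0]
theorem fold_pair (f : Int → Int) (xs : List Int) (l0 : List Int) (c0 : Int) :
    xs.foldl (fun (st : List Int × Int) j => (st.1 ++ [f j], st.2 + 1)) (l0, c0)
      = (l0 ++ xs.map f, c0 + xs.length) := by
  induction xs generalizing l0 c0 with
  | nil => simp
  | cons x xs ih => simp [ih]; omega

-- the inner for-loop: window k and the advanced count
theorem inner_eq (n m : Int) (hn : 1 ≤ n) (hm : 1 ≤ m) (k : Nat)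
    (hk : ((k : Int) + 1) * (m - 1) < n * m) :
    fpA_inner (fpA_list1 n m) m ((k : Int) * (m - 1))
      = (fpW n m k, (k : Int) * (m - 1) + m) := by
  unfold fpA_inner
  rw [fold_pair]
  rw [PySem.List.pyRange_one]
  have hlen : (m + (k : Int) * (m - 1) - (k : Int) * (m - 1)).toNat = m.toNat := by omega
  rw [hlen]
  rw [List.map_map, Prod.mk.injEq]
  constructor
  · rw [List.nil_append]
    unfold fpW
    apply List.map_congr_left
    intro t ht
    rw [List.mem_range] at ht
    simp only [Function.comp_apply]
    have htm : (t : Int) ≤ m - 1 := by omega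
    have hKle : (k : Int) * (m - 1) + t < n * m := by nlinarith
    rw [list1_get n m hn _ (by nlinarith) hKle]
  · simp only [List.length_map, List.length_range]
    omega
-- Euclid port computes Nat.gcd
theorem fpB_gcd_eq (fuel : Nat) (a b : Int) (ha : 0 ≤ a) (hb : 0 ≤ b) (hf : b.natAbs < fuel) :
    fpB_gcd fuel a b = (Nat.gcd b.natAbs a.natAbs : Int) := by
  induction fuel generalizing a b with
  | zero => omega
  | succ fuel ih =>
    unfold fpB_gcd
    by_cases hc : b = 0
    · simp [hc, Nat.gcd_zero_left]
      exact (abs_of_nonneg ha).symm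
    · have hbpos : 0 < b := by omega
      rw [if_pos hc, PySem.Int.mod_eq_emod_of_pos hbpos]
      have hmn : 0 ≤ a % b := Int.emod_nonneg a (by omega)
      have hml : a % b < b := Int.emod_lt_of_pos a hbpos
      rw [ih b (a % b) hb hmn (by omega)]
      have h1 : (a % b).natAbs = a.natAbs % b.natAbs := by
        have ha2 : a = (a.natAbs : Int) := by omega
        have hb2 : b = (b.natAbs : Int) := by omega
        conv_lhs => rw [ha2, hb2]
        rw [← Int.natCast_mod, Int.natAbs_natCast]
      rw [h1, ← Nat.gcd_rec]

-- divisibility characterisation: N | c*a iff (N / gcd a N) | c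
theorem dvd_iff_div_gcd (N a c : Nat) (hN : 0 < N) :
    (N ∣ c * a ↔ (N / Nat.gcd a N) ∣ c) := by
  set g := Nat.gcd a N with hg_def
  have hg : 0 < g := Nat.gcd_pos_of_pos_right a hN
  obtain ⟨a', ha'⟩ := Nat.gcd_dvd_left a N
  obtain ⟨N', hN'⟩ := Nat.gcd_dvd_right a N
  have hag : a / g = a' := by rw [ha']; exact Nat.mul_div_cancel_left a' hg
  have hNg : N / g = N' := by rw [hN']; exact Nat.mul_div_cancel_left N' hg
  have hcop : Nat.Coprime N' a' := by
    have h := Nat.coprime_div_gcd_div_gcd (m := a) (n := N) hg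
    rw [← hg_def, hag, hNg] at h
    exact h.symm
  rw [hNg]
  constructor
  · intro h
    have h2 : N' ∣ c * a' := by
      apply (Nat.mul_dvd_mul_iff_left hg).mp
      rw [show g * (c * a') = c * (g * a') by ring, ← ha', ← hN']
      exact h
    exact hcop.dvd_of_dvd_mul_right h2
  · rintro ⟨d, hd⟩
    refine ⟨d * a', ?_⟩
    rw [hd]
    conv_rhs => rw [hN']
    conv_lhs => rw [ha']
    ring
theorem fpW_last (n m : Int) (hm : 1 ≤ m) (k : Nat) :
    PySem.List.pyGetD (fpW n m k) (-1) 0 = (((k : Int) + 1) * (m - 1)) % n + 1 := by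
  unfold fpW
  rw [show m.toNat = (m.toNat - 1) + 1 by omega, List.range_succ, List.map_append, List.map_singleton,
    PySem.List.pyGetD_neg_one_append_singleton]
  have h : ((m.toNat - 1 : Nat) : Int) = m - 1 := by omega
  rw [h]
  congr 1
  congr 1
  ring

-- cyclic-successor chain invariant (B's inner loop; only the length of l matters)
theorem chain_inv (n : Int) (hn : 1 ≤ n) (base : Int) (l : List Int) (c : Nat) :
    l.foldl
      (fun (w : List Int) _ =>
        let last := PySem.List.pyGetD w (-1) 0
        w ++ [if last = n then 1 else last + 1])
      ((List.range (c + 1)).map (fun (t : Nat) => (base + t) % n + 1))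
    = (List.range (c + l.length + 1)).map (fun (t : Nat) => (base + t) % n + 1) := by
  induction l generalizing c with
  | nil => simp
  | cons x l ih =>
    rw [List.foldl_cons]
    have hstep :
        (let last := PySem.List.pyGetD ((List.range (c + 1)).map (fun (t : Nat) => (base + t) % n + 1)) (-1) 0
         ((List.range (c + 1)).map (fun (t : Nat) => (base + t) % n + 1)) ++ [if last = n then 1 else last + 1])
        = (List.range (c + 2)).map (fun (t : Nat) => (base + t) % n + 1) := by
      rw [show c + 2 = (c + 1) + 1 by omega, List.range_succ (n := c + 1), List.map_append, List.map_singleton]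
      simp only []
      rw [List.range_succ (n := c), List.map_append, List.map_singleton,
        PySem.List.pyGetD_neg_one_append_singleton, ← List.map_singleton (f := fun (t : Nat) => (base + t) % n + 1),
        ← List.map_append, ← List.range_succ]
      congr 1
      have hs := succ_mod n (base + c) hn
      rw [hs, show base + (((c + 1 : Nat)) : Int) = base + c + 1 by push_cast; ring]
    rw [hstep, ih (c + 1)]
    simp only [List.length_cons]
    congr 2
    omega

theorem fpB_window_eq (n m : Int) (hn : 1 ≤ n) (hm : 1 ≤ m) (base : Int) :
    fpB_window n m (base % n + 1)
      = (List.range m.toNat).map (fun (t : Nat) => (base + t) % n + 1) := by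
  unfold fpB_window
  have h0 : [base % n + 1] = (List.range (0 + 1)).map (fun (t : Nat) => (base + t) % n + 1) := by
    simp
  rw [h0, chain_inv n hn base _ 0]
  rw [PySem.List.length_pyRange_one]
  congr 2
  omega
-- B's outer loop invariant (only the length of l matters)
theorem bloop_inv (n m : Int) (hn : 1 ≤ n) (hm : 1 ≤ m) (l : List Int) (i : Nat) :
    l.foldl
      (fun (st : List (List Int) × Int) _ =>
        let w := fpB_window n m st.2
        (st.1 ++ [w], PySem.List.pyGetD w (-1) 0))
      ((List.range i).map (fpW n m), ((i : Int) * (m - 1)) % n + 1)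
    = ((List.range (i + l.length)).map (fpW n m), (((i + l.length : Nat) : Int) * (m - 1)) % n + 1) := by
  induction l generalizing i with
  | nil => simp
  | cons x l ih =>
    rw [List.foldl_cons]
    have hw : fpB_window n m (((i : Int) * (m - 1)) % n + 1) = fpW n m i :=
      fpB_window_eq n m hn hm ((i : Int) * (m - 1))
    simp only [hw]
    have hlast := fpW_last n m hm i
    rw [hlast]
    have hpush : (((i : Int) + 1) * (m - 1)) % n + 1 = (((i + 1 : Nat) : Int) * (m - 1)) % n + 1 := by
      push_cast; ring_nf
    rw [hpush, ← List.map_singleton (f := fpW n m), ← List.map_append, ← List.range_succ]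
    rw [ih (i + 1)]
    simp only [List.length_cons]
    rw [show i + 1 + l.length = i + (l.length + 1) by omega]
theorem fpB_eq_ref (n m : Int) (hn : 1 ≤ n) (hm : 1 ≤ m) :
    find_path_alt n m = (List.range (n.toNat / Nat.gcd (m - 1).toNat n.toNat)).map (fpW n m) := by
  unfold find_path_alt
  set G := Nat.gcd (m - 1).toNat n.toNat with hG
  have hgcd : fpB_gcd (n.natAbs + 1) (m - 1) n = (G : Int) := by
    rw [fpB_gcd_eq (n.natAbs + 1) (m - 1) n (by omega) (by omega) (by omega), hG]
    congr 1
    rw [Nat.gcd_comm]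
    congr 1 <;> omega
  simp only [hgcd]
  have hk : PySem.Int.floordiv n (G : Int) = ((n.toNat / G : Nat) : Int) := by
    conv_lhs => rw [show n = ((n.toNat : Nat) : Int) by omega]
    rw [PySem.Int.floordiv_natCast]
  rw [hk]
  have h0 : (([] : List (List Int)), (1 : Int))
      = ((List.range 0).map (fpW n m), (((0 : Nat) : Int) * (m - 1)) % n + 1) := by
    simp
  rw [h0, bloop_inv n m hn hm _ 0]
  rw [PySem.List.length_pyRange_one, sub_zero, Int.toNat_natCast]
  simp
-- A's while-loop invariant: starting at window k it appends windows k .. K-1 and stops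
theorem aloop_inv (n m : Int) (hn : 1 ≤ n) (hm : 1 ≤ m) (fuel : Nat) (k : Nat) (acc : List (List Int))
    (hk : k < n.toNat / Nat.gcd (m - 1).toNat n.toNat)
    (hf : n.toNat / Nat.gcd (m - 1).toNat n.toNat - k ≤ fuel) :
    fpA_loop (fpA_list1 n m) m fuel ((k : Int) * (m - 1)) acc
      = acc ++ (List.range (n.toNat / Nat.gcd (m - 1).toNat n.toNat - k)).map (fun i => fpW n m (k + i)) := by
  set G := Nat.gcd (m - 1).toNat n.toNat with hG
  set K := n.toNat / G with hK
  induction fuel generalizing k acc with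
  | zero => omega
  | succ fuel ih =>
    have hinner := inner_eq n m hn hm k (by
      have h1 : (k : Int) + 1 ≤ (K : Int) := by exact_mod_cast hk
      have h2 : (K : Int) ≤ n := by
        have := Nat.div_le_self n.toNat G
        omega
      nlinarith)
    rw [fpA_loop]
    simp only [hinner]
    rw [fpW_last n m hm k]
    -- the stop test: window k ends in 1  ↔  n ∣ (k+1)*(m-1)  ↔  K ∣ k+1
    have h1 : (((m - 1).toNat : Nat) : Int) = m - 1 := by omega
    have hdvd : ((((k : Int) + 1) * (m - 1)) % n + 1 = 1) ↔ (K ∣ (k + 1)) := by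
      rw [add_eq_right,
        show ((k : Int) + 1) * (m - 1) = (((k + 1) * (m - 1).toNat : Nat) : Int) by push_cast [h1]; ring,
        show n = ((n.toNat : Nat) : Int) by omega,
        PySem.Int.emod_eq_zero_iff_dvd, Int.natCast_dvd_natCast, hK, hG]
      exact dvd_iff_div_gcd n.toNat (m - 1).toNat (k + 1) (by omega)
    by_cases hstop : K ∣ (k + 1)
    · have hkK : k + 1 = K := by
        have := Nat.le_of_dvd (by omega) hstop
        omega
      rw [if_neg (show ¬ _ ≠ _ from fun h => h (hdvd.mpr hstop))]
      rw [show K - k = 1 by omega]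
      simp
    · have hklt : k + 1 < K := by
        by_contra hcon
        have heq : k + 1 = K := by omega
        exact hstop (by simp [heq])
      rw [if_pos (show _ ≠ _ from fun h => hstop (hdvd.mp h))]
      rw [show (k : Int) * (m - 1) + m - 1 = ((k + 1 : Nat) : Int) * (m - 1) by push_cast; ring]
      rw [ih (k + 1) (acc ++ [fpW n m k]) (by omega) (by omega)]
      rw [show K - k = (K - (k + 1)) + 1 by omega]
      rw [List.range_succ_eq_map, List.map_cons, List.map_map, List.append_assoc, List.singleton_append]
      congr 2
      apply List.map_congr_left
      intro a _
      simp only [Function.comp_apply]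
      congr 1
      omega
theorem fpA_eq_ref (n m : Int) (hn : 1 ≤ n) (hm : 1 ≤ m) :
    find_path n m = (List.range (n.toNat / Nat.gcd (m - 1).toNat n.toNat)).map (fpW n m) := by
  unfold find_path
  have hg : 0 < Nat.gcd (m - 1).toNat n.toNat := Nat.gcd_pos_of_pos_right _ (by omega)
  have hK1 : 0 < n.toNat / Nat.gcd (m - 1).toNat n.toNat :=
    Nat.div_pos (Nat.le_of_dvd (by omega) (Nat.gcd_dvd_right _ _)) hg
  have hKle : n.toNat / Nat.gcd (m - 1).toNat n.toNat ≤ n.toNat := Nat.div_le_self _ _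
  have h := aloop_inv n m hn hm (n.toNat + 1) 0 [] hK1 (by omega)
  rw [show ((0 : Nat) : Int) * (m - 1) = (0 : Int) by simp] at h
  rw [h]
  simp

-- ===== VERDICT (by name: the statement is the Claim_ definition above) =====
theorem find_path_spec : Claim_equal_find_path := by
  intro n m _ hpre
  unfold Spec_find_path
  rw [fpA_eq_ref n m hpre.1 hpre.2, fpB_eq_ref n m hpre.1 hpre.2]
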